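-- pv_equiv track=rewrite | github.com/niufentang/opencode_dev | utils/analyze_all.py | _merge_adjacent_changes
-- ===== SOURCE A (Python) =====
-- def _merge_adjacent_changes(changes: list[dict]) -> list[dict]:
--     if not changes:
--         return []
--     merged = [changes[0]]
--     for c in changes[1:]:
--         last = merged[-1]
--         same_color = c.get("color") == last.get("color")
--         same_type = c["type"] == last["type"]
--         if same_color and same_type and len(last["summary"]) < 150:
--             last["summary"] = (last["summary"] + " " + c["summary"])[:200]
--             last["detail"] = (last["detail"] + "\n" + c["detail"])[:500]
--         else:
--             merged.append(c)
--     for c in merged: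
--         c.pop("color", None)
--     return merged
-- ===== SOURCE B (Python) =====
-- # B: two-phase decomposition -- split the list into maximal runs of equal
-- # (color, type), then fold each run into chunks by the 150-char summary
-- # threshold, stripping "color" on emit.  Non-mutating (A updates the input
-- # dicts in place; equivalence claimed is about the return value only).
-- def _merge_adjacent_changes(changes: list[dict]) -> list[dict]:
--     runs = []
--     for c in changes:
--         k = (c.get("color"), c.get("type"))
--         if runs and runs[-1][0] == k:
--             runs[-1][1].append(c)
--         else:
--             runs.append((k, [c]))
--     result = []
--     for _, run in runs:
--         acc = dict(run[0])
--         for c in run[1:]: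
--             if len(acc["summary"]) < 150:
--                 acc["summary"] = (acc["summary"] + " " + c["summary"])[:200]
--                 acc["detail"] = (acc["detail"] + "\n" + c["detail"])[:500]
--             else:
--                 acc.pop("color", None)
--                 result.append(acc)
--                 acc = dict(c)
--         acc.pop("color", None)
--         result.append(acc)
--     return result
-- ===== Notes on version B (the rewrite author's own statement) =====
-- stated objective: alternative
-- what changed: Replaces A's single pass that mutates the tail of the growing output and a final color-popping pass with a two-phase decomposition: first split the input into maximal runs of equal (color, type), then fold each run into chunks by the 150-char summary threshold, stripping 'color' as each chunk is emitted; B builds fresh dicts instead of mutating the input.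
import Mathlib
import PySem

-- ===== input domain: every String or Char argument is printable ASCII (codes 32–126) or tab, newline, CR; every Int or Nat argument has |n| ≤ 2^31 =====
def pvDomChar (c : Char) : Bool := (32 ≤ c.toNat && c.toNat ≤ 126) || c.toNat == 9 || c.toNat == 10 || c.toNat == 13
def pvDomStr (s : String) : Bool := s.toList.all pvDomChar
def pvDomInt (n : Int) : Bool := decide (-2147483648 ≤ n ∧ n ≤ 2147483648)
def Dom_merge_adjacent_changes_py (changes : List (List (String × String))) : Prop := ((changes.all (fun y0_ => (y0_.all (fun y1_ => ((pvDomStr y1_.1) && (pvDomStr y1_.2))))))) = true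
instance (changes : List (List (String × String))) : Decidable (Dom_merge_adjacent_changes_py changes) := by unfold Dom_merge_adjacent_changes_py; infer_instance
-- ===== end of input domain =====

-- B replaces A's single mutate-the-last-output pass + final color-popping pass by a
-- two-phase shape (split into maximal (color,type)-runs, then chunk each run by the
-- 150-char summary threshold, stripping "color" on emit); A mutates the input dicts
-- in place, B does not — the equivalence proved is about the return value only.

-- ===== PORT A =====
-- loop body of A's single pass (merged[-1] read, conditional in-place merge / append)
def pvStepA (m : List (PySem.Dict String String)) (c : PySem.Dict String String) :
    List (PySem.Dict String String) :=
  let last := m.getLastD PySem.Dict.empty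
  if (c.get? "color" == last.get? "color") && (c.get? "type" == last.get? "type")
      && decide (PySem.Str.len (last.getD "summary" "") < 150) then
    m.dropLast ++ [(last.insert "summary"
        (PySem.Str.slice (last.getD "summary" "" ++ " " ++ c.getD "summary" "") none (some 200))).insert "detail"
        (PySem.Str.slice (last.getD "detail" "" ++ "\n" ++ c.getD "detail" "") none (some 500))]
  else m ++ [c]

def merge_adjacent_changes_py (changes : List (List (String × String))) : List (List (String × String)) :=
  match changes.map PySem.Dict.mk with
  | [] => []
  | c0 :: rest =>
    let merged := rest.foldl pvStepA [c0]
    (merged.map (fun d => d.erase "color")).map PySem.Dict.items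

-- ===== PORT B =====
-- phase 1 loop body: extend the last run if the (color, type) key matches, else open a new run
def pvStepR (runs : List ((Option String × Option String) × List (PySem.Dict String String)))
    (c : PySem.Dict String String) :
    List ((Option String × Option String) × List (PySem.Dict String String)) :=
  let k := (c.get? "color", c.get? "type")
  match runs.getLast? with
  | some kr => if kr.1 = k then runs.dropLast ++ [(kr.1, kr.2 ++ [c])]
               else runs ++ [(k, [c])]
  | none => [(k, [c])]

-- phase 2 inner loop body: fold a run member into (emitted chunks, current accumulator)
def pvStepI (p : List (PySem.Dict String String) × PySem.Dict String String)
    (c : PySem.Dict String String) :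
    List (PySem.Dict String String) × PySem.Dict String String :=
  if decide (PySem.Str.len (p.2.getD "summary" "") < 150) then
    (p.1, (p.2.insert "summary"
      (PySem.Str.slice (p.2.getD "summary" "" ++ " " ++ c.getD "summary" "") none (some 200))).insert "detail"
      (PySem.Str.slice (p.2.getD "detail" "" ++ "\n" ++ c.getD "detail" "") none (some 500)))
  else (p.1 ++ [p.2.erase "color"], c)

-- phase 2 outer loop body: chunk one run, stripping "color" on each emit
def pvStepO (res : List (PySem.Dict String String))
    (kr : (Option String × Option String) × List (PySem.Dict String String)) :
    List (PySem.Dict String String) :=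
  match kr.2 with
  | [] => res
  | r0 :: rtl =>
    let p := rtl.foldl pvStepI (res, r0)
    p.1 ++ [p.2.erase "color"]

def merge_adjacent_changes_py_alt (changes : List (List (String × String))) : List (List (String × String)) :=
  let runs := (changes.map PySem.Dict.mk).foldl pvStepR []
  let result := runs.foldl pvStepO []
  result.map PySem.Dict.items

-- ===== PRECONDITION & SPEC =====
-- Pre_ admits exactly the inputs on which A returns normally: A raises KeyError when,
-- with ≥ 2 changes, some dict lacks "type", or when the merging pass reads a missing
-- "summary"/"detail"; which of those reads happen depends only on the (color,type) run
-- structure and the accumulated summary LENGTHS, which is all this scan tracks (it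
-- keeps no dicts and computes no part of either output).
-- pvPreScan k l hd cs: k = key of the current accumulator, l = length of its "summary"
-- (none = missing), hd = whether it has "detail"; true iff no forced read is missing.
def pvPreScan : (Option String × Option String) → Option Int → Bool →
    List (PySem.Dict String String) → Bool
  | _, _, _, [] => true
  | k, l, hd, c :: cs =>
    if (c.get? "color", c.get? "type") = k then
      match l with
      | none => false
      | some lv =>
        if lv < 150 then
          hd && (c.get? "summary").isSome && (c.get? "detail").isSome &&
            pvPreScan k (some (min (lv + 1 + PySem.Str.len (c.getD "summary" "")) 200)) true cs
        else pvPreScan k ((c.get? "summary").map PySem.Str.len) ((c.get? "detail").isSome) cs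
    else pvPreScan (c.get? "color", c.get? "type")
      ((c.get? "summary").map PySem.Str.len) ((c.get? "detail").isSome) cs

def Pre_merge_adjacent_changes_py (changes : List (List (String × String))) : Prop :=
  changes.length ≤ 1 ∨
  ((changes.all (fun d => ((PySem.Dict.mk d).get? "type").isSome)) = true ∧
   (match changes.map PySem.Dict.mk with
    | [] => true
    | a :: rest =>
      pvPreScan (a.get? "color", a.get? "type")
        ((a.get? "summary").map PySem.Str.len) ((a.get? "detail").isSome) rest) = true)
instance (changes : List (List (String × String))) : Decidable (Pre_merge_adjacent_changes_py changes) := by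
  unfold Pre_merge_adjacent_changes_py; infer_instance
def pvWitness_merge_adjacent_changes_py : (List (List (String × String))) :=
  [[("type", "edit"), ("summary", "s1"), ("detail", "d1"), ("color", "red")],
   [("type", "edit"), ("summary", "s2"), ("detail", "d2"), ("color", "red")]]

def Spec_merge_adjacent_changes_py (changes : List (List (String × String))) (out : List (List (String × String))) : Prop := out = merge_adjacent_changes_py_alt changes
instance (changes : List (List (String × String))) (out : List (List (String × String))) : Decidable (Spec_merge_adjacent_changes_py changes out) := by unfold Spec_merge_adjacent_changes_py; infer_instance

-- ===== CLAIM (what is proved, stated in full; the proofs are below) =====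
def Claim_equal_merge_adjacent_changes_py : Prop := ∀ (changes : List (List (String × String))), Dom_merge_adjacent_changes_py changes → Pre_merge_adjacent_changes_py changes → Spec_merge_adjacent_changes_py changes (merge_adjacent_changes_py changes)

-- ===== LEMMAS AND PROOFS =====

-- the (color, type) key both programs group by
def pvKey (c : PySem.Dict String String) : Option String × Option String :=
  (c.get? "color", c.get? "type")

-- the merged dict both programs build from an accumulator and the next change
def pvMerge (last c : PySem.Dict String String) : PySem.Dict String String :=
  (last.insert "summary"
    (PySem.Str.slice (last.getD "summary" "" ++ " " ++ c.getD "summary" "") none (some 200))).insert "detail"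
    (PySem.Str.slice (last.getD "detail" "" ++ "\n" ++ c.getD "detail" "") none (some 500))

-- A's loop, state reduced to the current last element (the frozen prefix factored out)
def pvG : PySem.Dict String String → List (PySem.Dict String String) → List (PySem.Dict String String)
  | cur, [] => [cur]
  | cur, c :: cs =>
    if pvKey c = pvKey cur ∧ PySem.Str.len (cur.getD "summary" "") < 150 then
      pvG (pvMerge cur c) cs
    else cur :: pvG c cs

-- B's inner chunking loop: (emitted chunks of this run so far, current accumulator)
def pvC2 : PySem.Dict String String → List (PySem.Dict String String) →
    List (PySem.Dict String String) × PySem.Dict String String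
  | acc, [] => ([], acc)
  | acc, c :: cs =>
    if PySem.Str.len (acc.getD "summary" "") < 150 then
      pvC2 (pvMerge acc c) cs
    else
      let p := pvC2 c cs
      (acc.erase "color" :: p.1, p.2)

def pvChunk (kr : (Option String × Option String) × List (PySem.Dict String String)) :
    List (PySem.Dict String String) :=
  match kr.2 with
  | [] => []
  | a :: t => (pvC2 a t).1 ++ [(pvC2 a t).2.erase "color"]

-- B's run-splitting loop, state reduced to the current run (the frozen prefix factored out)
def pvR : (Option String × Option String) → List (PySem.Dict String String) →
    List (PySem.Dict String String) →
    List ((Option String × Option String) × List (PySem.Dict String String))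
  | k, run, [] => [(k, run)]
  | k, run, c :: cs =>
    if k = pvKey c then pvR k (run ++ [c]) cs
    else (k, run) :: pvR (pvKey c) [c] cs

theorem pvG_cond (cur c : PySem.Dict String String) :
    ((c.get? "color" == cur.get? "color") && (c.get? "type" == cur.get? "type")
        && decide (PySem.Str.len (cur.getD "summary" "") < 150)) = true ↔
    (pvKey c = pvKey cur ∧ PySem.Str.len (cur.getD "summary" "") < 150) := by
  simp [pvKey, Prod.ext_iff, and_assoc]

theorem pvKey_merge (last c : PySem.Dict String String) : pvKey (pvMerge last c) = pvKey last := by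
  simp [pvKey, pvMerge,
    PySem.Dict.get?_insert_of_ne _ _ (show ("color" : String) ≠ "detail" by decide),
    PySem.Dict.get?_insert_of_ne _ _ (show ("color" : String) ≠ "summary" by decide),
    PySem.Dict.get?_insert_of_ne _ _ (show ("type" : String) ≠ "detail" by decide),
    PySem.Dict.get?_insert_of_ne _ _ (show ("type" : String) ≠ "summary" by decide)]

theorem pvStepA_concat (pre : List (PySem.Dict String String)) (cur c : PySem.Dict String String) :
    pvStepA (pre ++ [cur]) c =
      if pvKey c = pvKey cur ∧ PySem.Str.len (cur.getD "summary" "") < 150 then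
        pre ++ [pvMerge cur c]
      else (pre ++ [cur]) ++ [c] := by
  unfold pvStepA
  simp only [List.getLastD_concat, List.dropLast_concat]
  by_cases h : pvKey c = pvKey cur ∧ PySem.Str.len (cur.getD "summary" "") < 150
  · rw [if_pos ((pvG_cond cur c).mpr h), if_pos h]; rfl
  · rw [if_neg (fun hb => h ((pvG_cond cur c).mp hb)), if_neg h]

theorem pvFoldA_eq (cs : List (PySem.Dict String String)) :
    ∀ (pre : List (PySem.Dict String String)) (cur : PySem.Dict String String),
    cs.foldl pvStepA (pre ++ [cur]) = pre ++ pvG cur cs := by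
  induction cs with
  | nil => intro pre cur; simp [pvG]
  | cons c cs ih =>
    intro pre cur
    simp only [List.foldl_cons, pvStepA_concat, pvG]
    by_cases h : pvKey c = pvKey cur ∧ PySem.Str.len (cur.getD "summary" "") < 150
    · rw [if_pos h, if_pos h, ih]
    · rw [if_neg h, if_neg h, ih, List.append_assoc]; rfl

theorem pvStepR_concat (pre : List ((Option String × Option String) × List (PySem.Dict String String)))
    (k : Option String × Option String) (run : List (PySem.Dict String String))
    (c : PySem.Dict String String) :
    pvStepR (pre ++ [(k, run)]) c =
      if k = pvKey c then pre ++ [(k, run ++ [c])]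
      else (pre ++ [(k, run)]) ++ [(pvKey c, [c])] := by
  unfold pvStepR
  simp only [List.getLast?_concat, List.dropLast_concat]
  by_cases h : k = pvKey c
  · rw [if_pos (by simpa [pvKey] using h), if_pos h]
  · rw [if_neg (by simpa [pvKey] using h), if_neg h]; rfl

theorem pvFoldR_eq (cs : List (PySem.Dict String String)) :
    ∀ (pre : List ((Option String × Option String) × List (PySem.Dict String String)))
      (k : Option String × Option String) (run : List (PySem.Dict String String)),
    cs.foldl pvStepR (pre ++ [(k, run)]) = pre ++ pvR k run cs := by
  induction cs with
  | nil => intro pre k run; simp [pvR]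
  | cons c cs ih =>
    intro pre k run
    simp only [List.foldl_cons, pvStepR_concat, pvR]
    by_cases h : k = pvKey c
    · rw [if_pos h, if_pos h, ih]
    · rw [if_neg h, if_neg h]
      simpa using ih (pre ++ [(k, run)]) (pvKey c) [c]

theorem pvFoldI_eq (cs : List (PySem.Dict String String)) :
    ∀ (res : List (PySem.Dict String String)) (acc : PySem.Dict String String),
    cs.foldl pvStepI (res, acc) = (res ++ (pvC2 acc cs).1, (pvC2 acc cs).2) := by
  induction cs with
  | nil => intro res acc; simp [pvC2]
  | cons c cs ih =>
    intro res acc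
    simp only [List.foldl_cons, pvStepI, pvC2]
    by_cases h : PySem.Str.len (acc.getD "summary" "") < 150
    · rw [if_pos (by simpa using h), if_pos h]
      exact ih res (pvMerge acc c)
    · rw [if_neg (by simpa using h), if_neg h, ih]
      simp

theorem pvFoldO_eq (runs : List ((Option String × Option String) × List (PySem.Dict String String))) :
    ∀ (res : List (PySem.Dict String String)),
    runs.foldl pvStepO res = res ++ runs.flatMap pvChunk := by
  induction runs with
  | nil => intro res; simp
  | cons kr runs ih =>
    intro res
    have hstep : pvStepO res kr = res ++ pvChunk kr := by
      unfold pvStepO pvChunk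
      cases hkr : kr.2 with
      | nil => simp
      | cons r0 rtl => simp only [pvFoldI_eq, List.append_assoc]
    rw [List.foldl_cons, hstep, ih, List.flatMap_cons, List.append_assoc]

theorem pvC2_snoc (t : List (PySem.Dict String String)) :
    ∀ (a c : PySem.Dict String String),
    pvC2 a (t ++ [c]) =
      if PySem.Str.len ((pvC2 a t).2.getD "summary" "") < 150 then
        ((pvC2 a t).1, pvMerge (pvC2 a t).2 c)
      else ((pvC2 a t).1 ++ [(pvC2 a t).2.erase "color"], c) := by
  induction t with
  | nil => intro a c; by_cases h : PySem.Str.len (a.getD "summary" "") < 150 <;>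
      simp [pvC2]
  | cons x t ih =>
    intro a c
    simp only [List.cons_append, pvC2]
    by_cases h : PySem.Str.len (a.getD "summary" "") < 150
    · rw [if_pos h, if_pos h, ih]
    · rw [if_neg h, if_neg h, ih]
      split <;> simp

theorem pvC2_key (t : List (PySem.Dict String String)) :
    ∀ (a : PySem.Dict String String), (∀ c ∈ t, pvKey c = pvKey a) →
    pvKey (pvC2 a t).2 = pvKey a := by
  induction t with
  | nil => intro a _; simp [pvC2]
  | cons c t ih =>
    intro a hk
    simp only [pvC2]
    by_cases h : PySem.Str.len (a.getD "summary" "") < 150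
    · rw [if_pos h]
      rw [ih (pvMerge a c) ?_]
      · exact pvKey_merge a c
      · intro x hx; rw [hk x (List.mem_cons_of_mem _ hx), pvKey_merge]
    · rw [if_neg h]
      have := ih c (fun x hx => by
        rw [hk x (List.mem_cons_of_mem _ hx), hk c List.mem_cons_self])
      simpa [hk c List.mem_cons_self] using this

theorem pvMain (cs : List (PySem.Dict String String)) :
    ∀ (a : PySem.Dict String String) (t : List (PySem.Dict String String)),
    (∀ c ∈ t, pvKey c = pvKey a) →
    (pvC2 a t).1 ++ (pvG (pvC2 a t).2 cs).map (fun d => d.erase "color")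
      = (pvR (pvKey a) (a :: t) cs).flatMap pvChunk := by
  induction cs with
  | nil => intro a t _; simp [pvR, pvChunk, pvG]
  | cons c cs ih =>
    intro a t hk
    have hacc : pvKey (pvC2 a t).2 = pvKey a := pvC2_key t a hk
    simp only [pvG, pvR]
    by_cases h1 : pvKey c = pvKey a
    · have hk' : ∀ x ∈ t ++ [c], pvKey x = pvKey a := by
        intro x hx; rcases List.mem_append.mp hx with hx | hx
        · exact hk x hx
        · simp at hx; subst hx; exact h1
      rw [if_pos h1.symm]
      by_cases h2 : PySem.Str.len ((pvC2 a t).2.getD "summary" "") < 150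
      · rw [if_pos ⟨by rw [hacc]; exact h1, h2⟩]
        have hsnoc : pvC2 a (t ++ [c]) = ((pvC2 a t).1, pvMerge (pvC2 a t).2 c) := by
          rw [pvC2_snoc, if_pos h2]
        have := ih a (t ++ [c]) hk'
        rw [hsnoc] at this
        simpa using this
      · rw [if_neg (fun hb => h2 hb.2)]
        have hsnoc : pvC2 a (t ++ [c]) = ((pvC2 a t).1 ++ [(pvC2 a t).2.erase "color"], c) := by
          rw [pvC2_snoc, if_neg h2]
        have := ih a (t ++ [c]) hk'
        rw [hsnoc] at this
        simpa using this
    · rw [if_neg (show ¬(pvKey c = pvKey (pvC2 a t).2 ∧ PySem.Str.len ((pvC2 a t).2.getD "summary" "") < 150) from fun he => h1 (hacc ▸ he.1))]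
      rw [if_neg (fun he => h1 he.symm)]
      have := ih c [] (by simp)
      simp only [pvC2] at this
      simp only [List.flatMap_cons, ← this]
      simp [pvChunk]

theorem pvPorts_eq (changes : List (List (String × String))) :
    merge_adjacent_changes_py changes = merge_adjacent_changes_py_alt changes := by
  unfold merge_adjacent_changes_py merge_adjacent_changes_py_alt
  match h : changes.map PySem.Dict.mk with
  | [] => simp
  | c0 :: rest =>
    simp only [List.foldl_cons]
    rw [show [c0] = ([] : List (PySem.Dict String String)) ++ [c0] from rfl, pvFoldA_eq]
    rw [show pvStepR [] c0 = ([] : List ((Option String × Option String) × List (PySem.Dict String String)))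
        ++ [(pvKey c0, [c0])] by unfold pvStepR; rfl, pvFoldR_eq, pvFoldO_eq]
    have := pvMain rest c0 [] (by simp)
    simp only [pvC2, List.nil_append] at this
    simp only [List.nil_append, this]

-- ===== VERDICT (by name: the statement is the Claim_ definition above) =====
theorem merge_adjacent_changes_py_spec : Claim_equal_merge_adjacent_changes_py := by
  intro changes _ _
  unfold Spec_merge_adjacent_changes_py
  exact pvPorts_eq changes
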